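-- pv_equiv track=rewrite | github.com/ARTHIKARTHIKEYAN/python-programs | Minimize Lateness using Greedy Algorithm.py | minimize_lateness
-- ===== SOURCE A (Python) =====
-- def minimize_lateness(tasks):
--     tasks.sort(key=lambda x: x[1])  # Sort tasks by their deadlines
--     current_time = 0
--     total_lateness = 0
--
--     for task in tasks:
--         start_time, deadline = task
--         lateness = max(0, current_time + start_time - deadline)  # Calculate lateness
--         total_lateness += lateness
--         current_time += start_time  # Update current time
--
--     return total_lateness
-- ===== SOURCE B (Python) =====
-- def minimize_lateness(tasks):
--     tasks.sort(key=lambda x: x[1])  # same in-place sort by deadline as A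
--
--     def solve(lo, hi, offset):
--         # (total lateness, total duration) of tasks[lo:hi] when started at `offset`
--         if hi - lo == 1:
--             start, deadline = tasks[lo]
--             return max(0, offset + start - deadline), start
--         mid = (lo + hi) // 2
--         left_late, left_span = solve(lo, mid, offset)
--         right_late, right_span = solve(mid, hi, offset + left_span)
--         return left_late + right_late, left_span + right_span
--
--     if not tasks:
--         return 0
--     return solve(0, len(tasks), 0)[0]
-- ===== Notes on version B (the rewrite author's own statement) =====
-- stated objective: alternative
-- what changed: A's single left-to-right loop carrying (current_time, total_lateness) is replaced by a divide-and-conquer recursion that splits the deadline-sorted list in half, each half returning (lateness, total duration), and offsets the right half by the left half's duration; same in-place sort.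
import Mathlib
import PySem

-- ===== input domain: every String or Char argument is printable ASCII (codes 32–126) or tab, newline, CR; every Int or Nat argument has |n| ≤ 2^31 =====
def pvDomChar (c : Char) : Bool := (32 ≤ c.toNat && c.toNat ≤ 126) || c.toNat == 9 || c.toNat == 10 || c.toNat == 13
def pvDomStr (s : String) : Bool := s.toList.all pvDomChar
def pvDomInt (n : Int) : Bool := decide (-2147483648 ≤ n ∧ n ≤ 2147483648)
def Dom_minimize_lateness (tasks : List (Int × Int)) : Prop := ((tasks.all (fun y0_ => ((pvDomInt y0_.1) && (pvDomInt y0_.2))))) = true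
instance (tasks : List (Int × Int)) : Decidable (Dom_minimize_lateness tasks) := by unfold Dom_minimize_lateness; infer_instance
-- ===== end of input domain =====

-- B replaces A's single accumulator loop by a divide-and-conquer recursion over the deadline-sorted
-- list (alternative decomposition, same cost); both sort `tasks` in place, so the equivalence proved
-- is about the return value with identical mutation.


-- ===== PORT A =====
def minimize_lateness (tasks : List (Int × Int)) : Int :=
  let ts := PySem.List.sorted tasks (fun x => x.2) false
  (ts.foldl (fun st task =>
      let start_time := task.1
      let deadline := task.2
      let lateness := max 0 (st.1 + start_time - deadline)
      (st.1 + start_time, st.2 + lateness)) ((0 : Int), (0 : Int))).2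

-- ===== PORT B =====
-- B's `solve(lo, hi, offset)` on the slice tasks[lo:hi], carried here as the sublist itself;
-- returns (total lateness, total duration) of the sublist started at `offset`.
def pvSolve : List (Int × Int) → Int → Int × Int
  | [], _ => (0, 0)            -- never reached from minimize_lateness_alt (B guards the empty list)
  | [(s, d)], offset => (max 0 (offset + s - d), s)
  | a :: b :: rest, offset =>
    let mid := (a :: b :: rest).length / 2
    let left := pvSolve ((a :: b :: rest).take mid) offset
    let right := pvSolve ((a :: b :: rest).drop mid) (offset + left.2)
    (left.1 + right.1, left.2 + right.2)
termination_by ts _ => ts.length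
decreasing_by all_goals (simp only [List.length_take, List.length_drop, List.length_cons]; omega)

def minimize_lateness_alt (tasks : List (Int × Int)) : Int :=
  let ts := PySem.List.sorted tasks (fun x => x.2) false
  if ts.isEmpty then 0 else (pvSolve ts 0).1

-- ===== PRECONDITION & SPEC =====
def Spec_minimize_lateness (tasks : List (Int × Int)) (out : Int) : Prop := out = minimize_lateness_alt tasks
instance (tasks : List (Int × Int)) (out : Int) : Decidable (Spec_minimize_lateness tasks out) := by unfold Spec_minimize_lateness; infer_instance

-- ===== CLAIM (what is proved, stated in full; the proofs are below) =====
def Claim_equal_minimize_lateness : Prop := ∀ (tasks : List (Int × Int)), Dom_minimize_lateness tasks → Spec_minimize_lateness tasks (minimize_lateness tasks)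

-- ===== LEMMAS AND PROOFS =====

-- A's loop body
def pvStep (st : Int × Int) (task : Int × Int) : Int × Int :=
  let start_time := task.1
  let deadline := task.2
  let lateness := max 0 (st.1 + start_time - deadline)
  (st.1 + start_time, st.2 + lateness)

theorem pv_foldl_shift (ts : List (Int × Int)) : ∀ (c t : Int),
    ts.foldl pvStep (c, t) = ((ts.foldl pvStep (c, 0)).1, t + (ts.foldl pvStep (c, 0)).2) := by
  induction ts with
  | nil => intro c t; simp
  | cons hd tl ih =>
    intro c t
    simp only [List.foldl_cons, pvStep]
    rw [ih _ (t + max 0 (c + hd.1 - hd.2)), ih _ (0 + max 0 (c + hd.1 - hd.2))]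
    simp only [Prod.mk.injEq, true_and]
    ring

theorem pv_foldl_split (l1 l2 : List (Int × Int)) (c : Int) :
    (l1 ++ l2).foldl pvStep (c, 0)
      = ((l2.foldl pvStep ((l1.foldl pvStep (c, 0)).1, 0)).1,
         (l1.foldl pvStep (c, 0)).2 + (l2.foldl pvStep ((l1.foldl pvStep (c, 0)).1, 0)).2) := by
  rw [List.foldl_append, pv_foldl_shift l2 (l1.foldl pvStep (c, 0)).1 (l1.foldl pvStep (c, 0)).2]

theorem pvSolve_eq_foldl (ts : List (Int × Int)) (c : Int) :
    pvSolve ts c = ((ts.foldl pvStep (c, 0)).2, (ts.foldl pvStep (c, 0)).1 - c) := by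
  induction hn : ts.length using Nat.strong_induction_on generalizing ts c with
  | _ n ih =>
  match ts, hn with
  | [], _ => simp [pvSolve]
  | [(s, d)], _ => simp [pvSolve, pvStep]
  | a :: b :: rest, hn =>
    have hm : (a :: b :: rest).length / 2 < n := by simp at hn ⊢; omega
    have hm2 : 1 ≤ (a :: b :: rest).length / 2 := by simp; omega
    have hlt : (List.take ((a :: b :: rest).length / 2) (a :: b :: rest)).length < n := by
      simp [List.length_take] at hn ⊢; omega
    have hld : (List.drop ((a :: b :: rest).length / 2) (a :: b :: rest)).length < n := by
      simp [List.length_drop] at hn ⊢; omega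
    rw [pvSolve]
    simp only [ih _ hlt _ _ rfl, ih _ hld _ _ rfl]
    conv_rhs => rw [← List.take_append_drop ((a :: b :: rest).length / 2) (a :: b :: rest),
      pv_foldl_split]
    generalize List.foldl pvStep (c, 0) (List.take ((a :: b :: rest).length / 2) (a :: b :: rest)) = P
    have hc : c + (P.1 - c) = P.1 := by ring
    rw [hc]
    refine Prod.ext ?_ ?_
    · dsimp only
    · dsimp only
      ring

theorem minimize_lateness_spec : Claim_equal_minimize_lateness := by
  intro tasks _
  unfold Spec_minimize_lateness minimize_lateness minimize_lateness_alt
  simp only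
  by_cases h : (PySem.List.sorted tasks (fun x => x.2) false).isEmpty
  · rw [if_pos h]
    rw [List.isEmpty_iff] at h
    rw [h]; rfl
  · rw [if_neg h, pvSolve_eq_foldl]
    rfl
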